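-- pv_equiv track=rewrite | github.com/mackosx/advent-of-code | py2025/day2/run.py | part2
-- ===== SOURCE A (Python) =====
-- def part2(id_ranges):
--     invalid_ids = []
--     for id_range in id_ranges:
--         for num in range(int(id_range[0]), int(id_range[1])+1):
--             str_num = str(num)
--             for sequence_len in range(1, (len(str_num)//2) + 1):
--                 if len(str_num) % sequence_len != 0:
--                     continue
--                 parts = [str_num[i-sequence_len:i] for i in range(sequence_len, len(str_num) + 1, sequence_len)]
--                 if len(set(parts)) == 1:
--                     invalid_ids.append(num)
--                     break
--     return sum(invalid_ids)
-- ===== SOURCE B (Python) =====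
-- def part2(id_ranges):
--     # Periodicity test via the classic doubled-string rotation trick:
--     # s consists of a block repeated >= 2 times  iff  s occurs in (s+s)[1:-1].
--     total = 0
--     for lo, hi in id_ranges:
--         for num in range(lo, hi + 1):
--             s = str(num)
--             if s in (s + s)[1:-1]:
--                 total += num
--     return total
-- ===== Notes on version B (the rewrite author's own statement) =====
-- stated objective: faster
-- what changed: The per-number periodicity test (try every divisor length, build chunk lists and a set) is replaced by the classic doubled-string trick -- s is a repeated block iff s occurs in (s+s)[1:-1] -- one substring search instead of a divisor loop with list/set construction, and the result is accumulated as a running sum instead of a list that is summed at the end.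
import Mathlib
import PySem

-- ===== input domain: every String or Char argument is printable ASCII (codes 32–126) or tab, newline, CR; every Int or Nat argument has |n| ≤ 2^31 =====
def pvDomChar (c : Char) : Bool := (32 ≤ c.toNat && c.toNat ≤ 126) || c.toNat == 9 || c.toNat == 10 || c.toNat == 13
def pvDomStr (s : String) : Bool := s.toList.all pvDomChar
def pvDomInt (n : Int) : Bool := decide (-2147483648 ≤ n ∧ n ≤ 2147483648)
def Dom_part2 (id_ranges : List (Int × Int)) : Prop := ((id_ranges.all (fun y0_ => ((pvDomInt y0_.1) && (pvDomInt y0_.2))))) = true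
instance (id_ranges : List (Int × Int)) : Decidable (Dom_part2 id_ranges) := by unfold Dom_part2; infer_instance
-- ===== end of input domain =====

-- B replaces A's per-number periodicity test (try each divisor length, compare chunks via a
-- set) by the doubled-string trick (s occurs in (s+s)[1:-1]) and keeps a running sum.

-- ===== PORT A =====
-- A's inner 'for sequence_len in range(1, len//2 + 1)' loop with its 'continue'/'break'
def part2SeekA (str_num : List Char) : List Int → Bool
  | [] => false
  | d :: rest =>
    if PySem.Int.mod (PySem.List.len str_num) d ≠ 0 then part2SeekA str_num rest
    else if PySem.Set.len (PySem.Set.ofList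
        ((PySem.List.pyRange d (PySem.List.len str_num + 1) d).map
          (fun i => PySem.List.slice str_num (some (i - d)) (some i)))) = 1 then true
    else part2SeekA str_num rest

def part2 (id_ranges : List (Int × Int)) : Int :=
  (id_ranges.foldl (fun invalid_ids id_range =>
    (PySem.List.pyRange id_range.1 (id_range.2 + 1) 1).foldl (fun invalid_ids num =>
      if part2SeekA (PySem.Int.toChars num)
          (PySem.List.pyRange 1 (PySem.Int.floordiv (PySem.List.len (PySem.Int.toChars num)) 2 + 1) 1)
      then invalid_ids ++ [num] else invalid_ids) invalid_ids) ([] : List Int)).sum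

-- ===== PORT B =====
def part2_alt (id_ranges : List (Int × Int)) : Int :=
  id_ranges.foldl (fun total pr =>
    (PySem.List.pyRange pr.1 (pr.2 + 1) 1).foldl (fun total num =>
      let s := PySem.Int.toChars num
      if PySem.Chars.isIn s (PySem.List.slice (s ++ s) (some 1) (some (-1)))
      then total + num else total) total) 0

-- ===== PRECONDITION & SPEC =====
def Spec_part2 (id_ranges : List (Int × Int)) (out : Int) : Prop := out = part2_alt id_ranges
instance (id_ranges : List (Int × Int)) (out : Int) : Decidable (Spec_part2 id_ranges out) := by unfold Spec_part2; infer_instance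

-- ===== CLAIM (what is proved, stated in full; the proofs are below) =====
def Claim_equal_part2 : Prop := ∀ (id_ranges : List (Int × Int)), Dom_part2 id_ranges → Spec_part2 id_ranges (part2 id_ranges)

-- ===== LEMMAS AND PROOFS =====

lemma toDigitsCore_len_ge (b : Nat) : ∀ (f n : Nat) (l : List Char),
    l.length ≤ (Nat.toDigitsCore b f n l).length := by
  intro f
  induction f with
  | zero => intro n l; simp [Nat.toDigitsCore]
  | succ f ih =>
    intro n l
    unfold Nat.toDigitsCore
    dsimp only
    split
    · simp
    · exact le_trans (by simp) (ih (n / b) (Nat.digitChar (n % b) :: l))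

-- str(num) is never the empty string
lemma toChars_ne_nil (n : Int) : PySem.Int.toChars n ≠ [] := by
  have hD : ∀ m : Nat, Nat.toDigits 10 m ≠ [] := by
    intro m
    unfold Nat.toDigits Nat.toDigitsCore
    dsimp only
    split
    · simp
    · intro h
      have := toDigitsCore_len_ge 10 m (m / 10) [Nat.digitChar (m % 10)]
      rw [h] at this; simp at this
  unfold PySem.Int.toChars
  split
  · simp
  · exact hD _

-- "all d-chunks of s are equal", the content of A's set test
def ChunksEq (s : List Char) (d : Nat) : Prop :=
  ∀ m < s.length / d, (s.drop (m * d)).take d = s.take d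

-- the common characterisation both tests are reduced to
def IsPeriodic (s : List Char) : Prop :=
  ∃ d : Nat, 1 ≤ d ∧ 2 * d ≤ s.length ∧ d ∣ s.length ∧ s.rotate d = s

-- A's seek loop is an 'any' over the candidate lengths
lemma seekA_eq_any (s : List Char) (ds : List Int) :
    part2SeekA s ds = ds.any (fun d =>
      decide (PySem.Int.mod (PySem.List.len s) d = 0) &&
      decide (PySem.Set.len (PySem.Set.ofList
        ((PySem.List.pyRange d (PySem.List.len s + 1) d).map
          (fun i => PySem.List.slice s (some (i - d)) (some i)))) = 1)) := by
  induction ds with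
  | nil => rfl
  | cons d rest ih =>
    rw [List.any_cons, ← ih]
    conv_lhs => rw [part2SeekA]
    by_cases h1 : PySem.Int.mod (PySem.List.len s) d = 0
    · rw [if_neg (not_not_intro h1)]
      by_cases h2 : PySem.Set.len (PySem.Set.ofList
        ((PySem.List.pyRange d (PySem.List.len s + 1) d).map
          (fun i => PySem.List.slice s (some (i - d)) (some i)))) = 1
      · rw [if_pos h2, decide_eq_true h1, decide_eq_true h2, Bool.true_and, Bool.true_or]
      · rw [if_neg h2, decide_eq_true h1, decide_eq_false h2, Bool.true_and, Bool.false_or]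
    · rw [if_pos h1, decide_eq_false h1, Bool.false_and, Bool.false_or]

-- a set built from a nonempty list has one element iff all list elements are equal
lemma setLen_one_iff {α : Type} [BEq α] [LawfulBEq α] (l : List α) (hl : l ≠ []) :
    PySem.Set.len (PySem.Set.ofList l) = 1 ↔ ∀ x ∈ l, ∀ y ∈ l, x = y := by
  have hnd := PySem.Set.nodup_ofList (xs := l)
  have hmem : ∀ x : α, x ∈ PySem.Set.ofList l ↔ x ∈ l := fun x => PySem.Set.mem_ofList l x
  unfold PySem.Set.len
  rw [show ((List.length (PySem.Set.ofList l) : Int) = 1 ↔ List.length (PySem.Set.ofList l) = 1) by omega]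
  constructor
  · intro h x hx y hy
    obtain ⟨a, ha⟩ := List.length_eq_one_iff.mp h
    have hx' := (hmem x).mpr hx
    have hy' := (hmem y).mpr hy
    rw [ha] at hx' hy'; simp at hx' hy'; simp [hx', hy']
  · intro h
    obtain ⟨x, xs, rfl⟩ := List.exists_cons_of_ne_nil hl
    have hx : x ∈ PySem.Set.ofList (x :: xs) := (hmem x).mpr (by simp)
    rcases hof : PySem.Set.ofList (x :: xs) with _ | ⟨a, _ | ⟨b, t⟩⟩
    · rw [hof] at hx; simp at hx
    · rfl
    · exfalso
      have ha : a ∈ x :: xs := (hmem a).mp (by rw [hof]; simp)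
      have hb : b ∈ x :: xs := (hmem b).mp (by rw [hof]; simp)
      have hab := h a ha b hb
      rw [hof] at hnd
      simp [hab] at hnd

-- A's parts list, simplified
lemma partsA_eq (s : List Char) (d : Nat) (hd : 1 ≤ d) (hdn : d ≤ s.length) :
    (PySem.List.pyRange (d : Int) ((s.length : Int) + 1) (d : Int)).map
      (fun i => PySem.List.slice s (some (i - (d : Int))) (some i))
    = (List.range (s.length / d)).map (fun k => (s.drop (k * d)).take d) := by
  rw [PySem.List.pyRange_of_pos _ _ (by exact_mod_cast hd : (0:Int) < (d:Int))]
  rw [if_pos (by exact_mod_cast Nat.lt_succ_of_le hdn : (d:Int) < (s.length:Int) + 1)]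
  have hc : ((s.length:Int) + 1 - d + d - 1) = (s.length : Int) := by ring
  rw [hc]
  have hdiv : ((s.length : Int)) / (d : Int) = ((s.length / d : Nat) : Int) := by
    exact_mod_cast rfl
  rw [hdiv, Int.toNat_natCast, List.map_map]
  apply List.map_congr_left
  intro k hk
  simp only [Function.comp_apply]
  have h1 : (d:Int) + (d:Int) * (k:Int) - (d:Int) = ((k * d : Nat) : Int) := by push_cast; ring
  have h2 : (d:Int) + (d:Int) * (k:Int) = (((k+1) * d : Nat) : Int) := by push_cast; ring
  rw [h1, h2, PySem.List.slice_natCast]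
  congr 1
  have : (k+1) * d = k * d + d := Nat.succ_mul _ _
  omega

-- shift-invariance iterated
lemma shift_iter (s : List Char) (d : Nat)
    (h : ∀ k, k + d < s.length → s[k + d]? = s[k]?) :
    ∀ m r, r + m * d < s.length → s[r + m * d]? = s[r]? := by
  intro m
  induction m with
  | zero => simp
  | succ m ih =>
    intro r hr
    have h1 : r + m * d + d < s.length := by rw [Nat.succ_mul] at hr; omega
    have h2 := h (r + m * d) h1
    rw [show r + (m+1) * d = r + m * d + d by ring, h2]
    exact ih r (by omega)

lemma chunk_getElem? (s : List Char) (a d r : Nat) :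
    ((s.drop a).take d)[r]? = if r < d then s[a + r]? else none := by
  rw [List.getElem?_take, List.getElem?_drop]

-- chunk equality ↔ rotation invariance, for a divisor length
lemma chunksEq_iff_rotate (s : List Char) (d : Nat) (hd : 1 ≤ d) (hdn : d ≤ s.length)
    (hdvd : d ∣ s.length) : ChunksEq s d ↔ s.rotate d = s := by
  set n := s.length with hn
  have hstep : (∀ k, k + d < n → s[k + d]? = s[k]?) ↔ s.rotate d = s := by
    constructor
    · intro R
      have R' := shift_iter s d R
      rw [List.rotate_eq_drop_append_take hdn]
      have h1 : s.drop d = s.take (n - d) := by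
        apply List.ext_getElem?
        intro k
        rw [List.getElem?_drop, List.getElem?_take]
        by_cases hk : k < n - d
        · rw [if_pos hk, Nat.add_comm d k]
          exact R k (by omega)
        · rw [if_neg hk, List.getElem?_eq_none (by omega)]
      have h2 : s.take d = s.drop (n - d) := by
        apply List.ext_getElem?
        intro r
        rw [List.getElem?_take, List.getElem?_drop]
        by_cases hr : r < d
        · rw [if_pos hr]
          obtain ⟨m, hm⟩ := hdvd
          have hm1 : 1 ≤ m := by nlinarith
          have h5 : (m - 1) * d = d * m - d := by rw [Nat.sub_mul, one_mul, Nat.mul_comm]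
          have hnd : n - d + r = r + (m - 1) * d := by omega
          rw [hnd, R' (m - 1) r (by omega)]
        · rw [if_neg hr, List.getElem?_eq_none (by omega)]
      rw [h1, h2]
      exact (List.take_append_drop (n - d) s)
    · intro hrot k hk
      have hds := List.rotate_eq_drop_append_take hdn
      rw [hrot] at hds
      calc s[k + d]? = (s.drop d)[k]? := by rw [List.getElem?_drop, Nat.add_comm]
        _ = (s.drop d ++ s.take d)[k]? := (List.getElem?_append_left (by simp; omega)).symm
        _ = s[k]? := by rw [← hds]
  rw [← hstep]
  constructor
  · intro hc k hk
    have hmd : ∀ m, m < n / d → ∀ r < d, s[m * d + r]? = s[r]? := by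
      intro m hm r hr
      have h2 := congrArg (fun l => l[r]?) (hc m hm)
      simp only at h2
      rw [chunk_getElem?, if_pos hr, List.getElem?_take, if_pos hr] at h2
      exact h2
    have hr : k % d < d := Nat.mod_lt _ (by omega)
    have hdm := Nat.div_add_mod k d
    have hcomm : k / d * d = d * (k / d) := Nat.mul_comm _ _
    have hsm : (k / d + 1) * d = k / d * d + d := Nat.succ_mul _ _
    obtain ⟨q, hq⟩ := hdvd
    have hnq : n / d = q := by rw [hq, Nat.mul_div_cancel_left _ (by omega)]
    have hcomm2 : d * (k / d + 1) = (k / d + 1) * d := Nat.mul_comm _ _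
    have hlt1 : k / d + 1 < n / d := by
      rw [hnq]
      have hlt : d * (k / d + 1) < d * q := by omega
      have := Nat.lt_of_mul_lt_mul_left hlt
      omega
    have hlt0 : k / d < n / d := by omega
    have e2 := hmd _ hlt1 (k % d) hr
    have e1 := hmd _ hlt0 (k % d) hr
    rw [show k + d = (k / d + 1) * d + k % d by omega, e2]
    conv_rhs => rw [show k = k / d * d + k % d by omega]
    rw [e1]
  · intro R m hm
    apply List.ext_getElem?
    intro r
    rw [chunk_getElem?, List.getElem?_take]
    by_cases hr : r < d
    · rw [if_pos hr, if_pos hr, Nat.add_comm (m*d) r]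
      have hm' : m + 1 ≤ s.length / d := hm
      have hle : (m + 1) * d ≤ s.length := (Nat.le_div_iff_mul_le (by omega)).mp hm'
      have hsm : (m + 1) * d = m * d + d := Nat.succ_mul _ _
      exact shift_iter s d R m r (by omega)
    · rw [if_neg hr, if_neg hr]

-- A's test ↔ IsPeriodic
lemma seekA_iff (s : List Char) (hs : s ≠ []) :
    part2SeekA s (PySem.List.pyRange 1 (PySem.Int.floordiv (PySem.List.len s) 2 + 1) 1) = true
    ↔ IsPeriodic s := by
  rw [seekA_eq_any, List.any_eq_true]
  have hn0 : 0 < s.length := List.length_pos_iff.mpr hs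
  have hfl : PySem.Int.floordiv (PySem.List.len s) 2 = ((s.length / 2 : Nat) : Int) := by
    rw [show PySem.List.len s = ((s.length : Nat) : Int) from PySem.List.len_eq s]
    exact_mod_cast PySem.Int.floordiv_natCast s.length 2
  have hlen : PySem.List.len s = ((s.length : Nat) : Int) := PySem.List.len_eq s
  constructor
  · rintro ⟨dI, hdm, hcond⟩
    rw [hfl, PySem.List.mem_pyRange_one] at hdm
    obtain ⟨hd1, hd2⟩ := hdm
    obtain ⟨d, rfl⟩ : ∃ d : Nat, dI = (d : Int) := ⟨dI.toNat, (Int.toNat_of_nonneg (by omega)).symm⟩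
    have hd1' : 1 ≤ d := by exact_mod_cast hd1
    have hdhalf : d ≤ s.length / 2 := by exact_mod_cast (by omega : (d:Int) ≤ ((s.length / 2 : Nat) : Int))
    have h2d : 2 * d ≤ s.length := by
      have := (Nat.le_div_iff_mul_le (by omega : 0 < 2)).mp hdhalf
      omega
    have hdn : d ≤ s.length := by omega
    rw [Bool.and_eq_true, decide_eq_true_eq, decide_eq_true_eq, hlen] at hcond
    obtain ⟨hmod, hset⟩ := hcond
    have hdvd : d ∣ s.length := by
      have := (PySem.Int.mod_eq_zero_iff_dvd _ _).mp hmod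
      exact_mod_cast this
    rw [partsA_eq s d hd1' hdn, setLen_one_iff _ (by
      have hpos := Nat.div_pos hdn (by omega : 0 < d)
      simp only [ne_eq, List.map_eq_nil_iff, List.range_eq_nil]
      omega)] at hset
    have hchunks : ChunksEq s d := by
      intro m hm
      have hx : (s.drop (m * d)).take d ∈ (List.range (s.length / d)).map (fun k => (s.drop (k * d)).take d) :=
        List.mem_map.mpr ⟨m, List.mem_range.mpr hm, rfl⟩
      have hy : s.take d ∈ (List.range (s.length / d)).map (fun k => (s.drop (k * d)).take d) := by
        refine List.mem_map.mpr ⟨0, List.mem_range.mpr (Nat.div_pos hdn (by omega)), ?_⟩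
        simp
      exact hset _ hx _ hy
    exact ⟨d, hd1', h2d, hdvd, (chunksEq_iff_rotate s d hd1' hdn hdvd).mp hchunks⟩
  · rintro ⟨d, hd1, h2d, hdvd, hrot⟩
    have hdn : d ≤ s.length := by omega
    refine ⟨(d : Int), ?_, ?_⟩
    · rw [hfl, PySem.List.mem_pyRange_one]
      constructor
      · exact_mod_cast hd1
      · have : d ≤ s.length / 2 := (Nat.le_div_iff_mul_le (by omega : 0 < 2)).mpr (by omega)
        exact_mod_cast Nat.lt_succ_of_le this
    · rw [Bool.and_eq_true, decide_eq_true_eq, decide_eq_true_eq, hlen]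
      refine ⟨(PySem.Int.mod_eq_zero_iff_dvd _ _).mpr (by exact_mod_cast hdvd), ?_⟩
      rw [partsA_eq s d hd1 hdn, setLen_one_iff _ (by
        have hpos := Nat.div_pos hdn (by omega : 0 < d)
        simp only [ne_eq, List.map_eq_nil_iff, List.range_eq_nil]
        omega)]
      have hchunks : ChunksEq s d := (chunksEq_iff_rotate s d hd1 hdn hdvd).mpr hrot
      intro x hx y hy
      obtain ⟨kx, hkx, rfl⟩ := List.mem_map.mp hx
      obtain ⟨ky, hky, rfl⟩ := List.mem_map.mp hy
      rw [hchunks kx (List.mem_range.mp hkx), hchunks ky (List.mem_range.mp hky)]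

-- occurrence of s at offset i in s++s is rotation invariance
lemma prefix_drop_double (s : List Char) (i : Nat) (hi : i ≤ s.length) :
    s <+: (s ++ s).drop i ↔ s.rotate i = s := by
  rw [List.drop_append_of_le_length hi, List.prefix_iff_eq_take, List.take_append,
      List.rotate_eq_drop_append_take hi]
  have h1 : (s.drop i).take s.length = s.drop i := List.take_of_length_le (by simp)
  have h2 : s.length - (s.drop i).length = i := by simp; omega
  rw [h1, h2, eq_comm]

lemma rotate_pow (s : List Char) (i : Nat) (hrot : s.rotate i = s) :
    ∀ k : Nat, s.rotate (k * i) = s := by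
  intro k
  induction k with
  | zero => simp
  | succ k ih =>
    rw [Nat.succ_mul, ← List.rotate_rotate, ih, hrot]

-- rotation by some 1 ≤ i < n can be improved to a divisor ≤ n/2 (gcd argument)
lemma rotate_gcd_reduce (s : List Char) (i : Nat) (h1 : 1 ≤ i) (h2 : i < s.length)
    (hrot : s.rotate i = s) : IsPeriodic s := by
  set n := s.length with hn
  have hn0 : 0 < n := by omega
  set g := Nat.gcd i n with hg
  have hg1 : 1 ≤ g := Nat.gcd_pos_of_pos_left _ (by omega)
  have hgi : g ≤ i := Nat.le_of_dvd (by omega) (Nat.gcd_dvd_left _ _)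
  have hgdvd : g ∣ n := Nat.gcd_dvd_right _ _
  have hbez : (g : ℤ) = i * Nat.gcdA i n + n * Nat.gcdB i n := Nat.gcd_eq_gcd_ab i n
  set a := Nat.gcdA i n with ha
  have hk0 : (0:ℤ) ≤ a % n := Int.emod_nonneg a (by exact_mod_cast (by omega : ¬ (n = 0)))
  set k : Nat := (a % (n:ℤ)).toNat with hk
  have hkcast : (k : ℤ) = a % n := Int.toNat_of_nonneg hk0
  have hmod : ((k * i : Nat) : ℤ) % n = ((g : Nat) : ℤ) := by
    push_cast
    rw [hkcast, Int.mul_emod, Int.emod_emod_of_dvd _ dvd_rfl]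
    rw [← Int.mul_emod]
    have : (a : ℤ) * i = g - n * Nat.gcdB i n := by rw [hbez]; ring
    rw [this, Int.sub_mul_emod_self_left]
    exact Int.emod_eq_of_lt (by exact_mod_cast Nat.zero_le g) (by exact_mod_cast lt_of_le_of_lt hgi h2)
  have hmodn : (k * i) % n = g := by
    have h6 : (((k * i) % n : Nat) : ℤ) = (g : ℤ) := by
      push_cast
      push_cast at hmod
      exact hmod
    exact_mod_cast h6
  have hrotg : s.rotate g = s := by
    rw [← hmodn]
    rw [show n = s.length from hn, List.rotate_mod, rotate_pow s i hrot k]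
  obtain ⟨m, hm⟩ := hgdvd
  have hm2 : 2 ≤ m := by
    rcases m with _ | _ | m
    · omega
    · exfalso; omega
    · omega
  have h2g : 2 * g ≤ n := by
    calc 2 * g ≤ m * g := Nat.mul_le_mul_right _ hm2
    _ = g * m := Nat.mul_comm _ _
    _ = n := hm.symm
  exact ⟨g, hg1, h2g, ⟨m, hm⟩, hrotg⟩

-- B's test ↔ IsPeriodic
lemma isIn_iff (s : List Char) (hs : s ≠ []) :
    PySem.Chars.isIn s (PySem.List.slice (s ++ s) (some 1) (some (-1))) = true
    ↔ IsPeriodic s := by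
  have hn0 : 0 < s.length := List.length_pos_iff.mpr hs
  have ht : PySem.List.slice (s ++ s) (some 1) (some (-1))
      = ((s ++ s).drop 1).take (2 * s.length - 2) := by
    unfold PySem.List.slice
    dsimp only
    rw [PySem.List.clampIdx_neg_one]
    unfold PySem.List.clampIdx
    rw [if_neg (by omega)]
    simp [List.length_append]
    rw [Nat.min_eq_left (by omega), List.drop_one]
    congr 1
    omega
  rw [ht, ← PySem.Chars.exists_prefix_drop_iff_isIn]
  constructor
  · rintro ⟨j, hj⟩
    rw [List.drop_take, List.drop_drop, List.prefix_take_iff] at hj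
    obtain ⟨hpre, hlen⟩ := hj
    have hij : 1 + j ≤ s.length - 1 := by omega
    rw [prefix_drop_double s (1+j) (by omega)] at hpre
    exact rotate_gcd_reduce s (1+j) (by omega) (by omega) hpre
  · rintro ⟨d, hd1, hd2, -, hrot⟩
    refine ⟨d - 1, ?_⟩
    rw [List.drop_take, List.drop_drop, List.prefix_take_iff]
    constructor
    · rw [prefix_drop_double s (1+(d-1)) (by omega), show 1+(d-1) = d by omega]
      exact hrot
    · omega

-- the two per-number tests agree
lemma key (num : Int) :
    part2SeekA (PySem.Int.toChars num)
      (PySem.List.pyRange 1 (PySem.Int.floordiv (PySem.List.len (PySem.Int.toChars num)) 2 + 1) 1)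
    = PySem.Chars.isIn (PySem.Int.toChars num)
        (PySem.List.slice (PySem.Int.toChars num ++ PySem.Int.toChars num) (some 1) (some (-1))) := by
  rw [Bool.eq_iff_iff, seekA_iff _ (toChars_ne_nil num), isIn_iff _ (toChars_ne_nil num)]

-- ===== VERDICT (by name: the statement is the Claim_ definition above) =====
theorem part2_spec : Claim_equal_part2 := by
  unfold Claim_equal_part2
  intro rs _
  unfold Spec_part2 part2 part2_alt
  suffices h : ∀ (rs : List (Int × Int)) (acc : List Int),
      (rs.foldl (fun invalid_ids id_range =>
        (PySem.List.pyRange id_range.1 (id_range.2 + 1) 1).foldl (fun invalid_ids num =>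
          if part2SeekA (PySem.Int.toChars num)
              (PySem.List.pyRange 1 (PySem.Int.floordiv (PySem.List.len (PySem.Int.toChars num)) 2 + 1) 1)
          then invalid_ids ++ [num] else invalid_ids) invalid_ids) acc).sum
      = rs.foldl (fun total pr =>
        (PySem.List.pyRange pr.1 (pr.2 + 1) 1).foldl (fun total num =>
          let s := PySem.Int.toChars num
          if PySem.Chars.isIn s (PySem.List.slice (s ++ s) (some 1) (some (-1)))
          then total + num else total) total) acc.sum by
    simpa using h rs []
  intro rs
  induction rs with
  | nil => intro acc; simp
  | cons r rest ih =>
    intro acc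
    simp only [List.foldl_cons]
    rw [PySem.List.foldl_append_if_eq_filter]
    rw [ih]
    congr 1
    rw [PySem.List.foldl_if_eq_foldl_filter
      (p := fun num => PySem.Chars.isIn (PySem.Int.toChars num)
        (PySem.List.slice (PySem.Int.toChars num ++ PySem.Int.toChars num) (some 1) (some (-1))))
      (f := fun total num => total + num)]
    rw [PySem.List.foldl_add _ (fun x => x)]
    simp only [List.map_id']
    rw [List.sum_append]
    congr 2
    apply List.filter_congr
    intro num _
    exact key num
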